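-- pv_equiv track=rewrite | github.com/ayoung0073/Algorithm | programmers/징검다리_건너기.py | solution
-- ===== SOURCE A (Python) =====
-- def check(stones, num, k):
--     cnt = 0
--     for i in range(len(stones)):
--         if stones[i] <= num:
--             cnt += 1
--             if cnt >= k:
--                 return False
--         else:
--             cnt = 0
--     return True
--
-- def solution(stones, k):
--     answer = 0
--     left = 0
--     right = 200000000
--
--     while left <= right:
--         mid = (left + right) // 2 # 학생 수
--         if check(stones, mid, k):
--             left = mid + 1
--         else:
--             right = mid - 1
--
--     return left
-- ===== SOURCE B (Python) =====
-- def solution(stones, k):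
--     # A's binary search over [0, 2*10**8] converges to the least wear level at which
--     # some window of k consecutive stones is entirely worn out, i.e. the minimum over
--     # all k-windows of the window maximum, clamped to A's search range [0, 200000001].
--     best = 200000001
--     for i in range(len(stones) - k + 1):
--         w = max(stones[i:i + k])
--         if w < best:
--             best = w
--     return max(0, best)
-- ===== Notes on version B (the rewrite author's own statement) =====
-- stated objective: simpler
-- what changed: Replaces the binary search over [0,2*10^8] with a feasibility-counting scan per probe by a direct computation: the answer is the minimum over all k-windows of the window maximum (clamped to A's search range), computed in one loop over windows.
-- outside the precondition, e.g. on solution([5], 0): A returns 5, B raises ValueError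
import Mathlib
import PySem

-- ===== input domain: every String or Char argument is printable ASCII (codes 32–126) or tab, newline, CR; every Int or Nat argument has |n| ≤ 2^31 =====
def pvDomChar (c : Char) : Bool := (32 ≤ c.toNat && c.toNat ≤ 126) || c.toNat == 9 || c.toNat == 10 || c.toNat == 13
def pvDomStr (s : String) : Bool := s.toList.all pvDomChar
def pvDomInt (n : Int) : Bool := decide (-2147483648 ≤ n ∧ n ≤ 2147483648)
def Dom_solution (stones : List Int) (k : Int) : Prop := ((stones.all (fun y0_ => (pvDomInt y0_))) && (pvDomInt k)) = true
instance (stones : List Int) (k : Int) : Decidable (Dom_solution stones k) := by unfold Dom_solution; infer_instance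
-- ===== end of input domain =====

-- B replaces A's binary search over [0, 2*10^8] by a direct one-loop minimum of window
-- maxima (same value, clamped to A's search range); objective: simpler.


-- ===== PORT A =====
-- check(stones, num, k): the for-loop over stones with the running counter cnt,
-- returning False as soon as cnt reaches k.
def checkGo (xs : List Int) (num k cnt : Int) : Bool :=
  match xs with
  | [] => true
  | s :: rest =>
    if s ≤ num then
      if cnt + 1 ≥ k then false else checkGo rest num k (cnt + 1)
    else checkGo rest num k 0

def check (stones : List Int) (num k : Int) : Bool := checkGo stones num k 0

-- the while-loop of solution. fuel only makes the recursion structural: the interval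
-- right + 1 - left starts at 200000001 and shrinks by at least 1 every iteration, so
-- with fuel 200000001 the 0-fuel branch is never reached.
def solGo (stones : List Int) (k : Int) (fuel : Nat) (left right : Int) : Int :=
  match fuel with
  | 0 => left
  | fuel + 1 =>
    if left ≤ right then
      let mid := PySem.Int.floordiv (left + right) 2
      if check stones mid k then solGo stones k fuel (mid + 1) right
      else solGo stones k fuel left (mid - 1)
    else left

def solution (stones : List Int) (k : Int) : Int := solGo stones k 200000001 0 200000000

-- ===== PORT B =====
-- max(stones[i:i+k]); Python's max raises on an empty list, which inside Pre_ (1 ≤ k)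
-- never happens here — the .getD 0 default is never taken on admitted inputs.
def winMax (stones : List Int) (k i : Int) : Int :=
  (PySem.List.max? (PySem.List.slice stones (some i) (some (i + k))) (fun y => y)).getD 0

def solution_alt (stones : List Int) (k : Int) : Int :=
  let n : Int := stones.length
  let best := (PySem.List.pyRange 0 (n - k + 1)).foldl
    (fun best i =>
      let w := winMax stones k i
      if w < best then w else best) 200000001
  max 0 best

-- ===== PRECONDITION & SPEC =====
-- Pre_ restricts to the task's natural domain k ≥ 1 (at least one person crosses):
-- for k ≤ 0 B's max() is applied to an empty window and raises ValueError.
def Pre_solution (stones : List Int) (k : Int) : Prop := 1 ≤ k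
instance (stones : List Int) (k : Int) : Decidable (Pre_solution stones k) := by unfold Pre_solution; infer_instance

def pvWitness_solution : List Int × Int := ([2, 4, 5, 3, 2, 1, 4, 2, 5, 1], 3)

def Spec_solution (stones : List Int) (k : Int) (out : Int) : Prop := out = solution_alt stones k
instance (stones : List Int) (k : Int) (out : Int) : Decidable (Spec_solution stones k out) := by unfold Spec_solution; infer_instance

-- ===== CLAIM (what is proved, stated in full; the proofs are below) =====
def Claim_equal_solution : Prop := ∀ (stones : List Int) (k : Int), Dom_solution stones k → Pre_solution stones k → Spec_solution stones k (solution stones k)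

-- ===== LEMMAS AND PROOFS =====

-- "some k consecutive stones are all ≤ num": the common specification both ports are
-- related to.
def HasRun (stones : List Int) (num k : Int) : Prop :=
  ∃ ys : List Int, ys <:+: stones ∧ (k : Int) ≤ ys.length ∧ ∀ y ∈ ys, y ≤ num

-- A-side characterisation of the loop, with the counter generalised.
theorem checkGo_false_iff (num k : Int) (hk : 1 ≤ k) :
    ∀ (xs : List Int) (cnt : Int), 0 ≤ cnt →
      (checkGo xs num k cnt = false ↔
        (∃ p : List Int, p <+: xs ∧ p ≠ [] ∧ (∀ y ∈ p, y ≤ num) ∧ k ≤ cnt + p.length) ∨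
          HasRun xs num k) := by
  intro xs
  induction xs with
  | nil =>
    intro cnt _
    simp only [checkGo]
    constructor
    · intro h; cases h
    · rintro (⟨p, hp, hne, _, _⟩ | ⟨ys, hys, hlen, _⟩)
      · exact absurd (List.prefix_nil.mp hp) hne
      · have := List.eq_nil_of_infix_nil hys
        subst this; simp at hlen; omega
  | cons s rest ih =>
    intro cnt hcnt
    simp only [checkGo]
    by_cases hs : s ≤ num
    · simp only [if_pos hs]
      by_cases hk2 : cnt + 1 ≥ k
      · rw [if_pos hk2]
        constructor
        · intro _
          left
          exact ⟨[s], ⟨rest, rfl⟩, by simp, by simpa using hs, by simpa using hk2⟩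
        · intro _; rfl
      · simp only [if_neg hk2]
        rw [ih (cnt + 1) (by omega)]
        constructor
        · rintro (⟨p, hp, hne, hle, hlen⟩ | hr)
          · left
            refine ⟨s :: p, List.cons_prefix_cons.mpr ⟨rfl, hp⟩, by simp, ?_, ?_⟩
            · intro y hy
              rcases List.mem_cons.mp hy with h | h
              · exact h ▸ hs
              · exact hle y h
            · simp only [List.length_cons]; push_cast; omega
          · right
            obtain ⟨ys, hys, h1, h2⟩ := hr
            exact ⟨ys, hys.trans (List.suffix_cons _ _).isInfix, h1, h2⟩
        · rintro (⟨p, hp, hne, hle, hlen⟩ | hr)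
          · -- p is a nonempty prefix of s :: rest, so p = s :: p'
            match p, hp with
            | [], _ => exact absurd rfl hne
            | a :: p', hp =>
              obtain ⟨ha, hp'⟩ := List.cons_prefix_cons.mp hp
              by_cases hp'nil : p' = []
              · subst hp'nil
                exfalso
                simp only [List.length_cons, List.length_nil] at hlen
                push_cast at hlen; omega
              · left
                refine ⟨p', hp', hp'nil, fun y hy => hle y (List.mem_cons_of_mem _ hy), ?_⟩
                simp only [List.length_cons] at hlen; push_cast at hlen ⊢; omega
          · obtain ⟨ys, hys, h1, h2⟩ := hr
            rcases List.infix_cons_iff.mp hys with hpre | hinf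
            · -- ys is a nonempty prefix of s :: rest, so ys = s :: ys'
              match ys, hpre, h1, h2 with
              | [], _, h1, _ => exfalso; simp at h1; omega
              | a :: ys', hpre, h1, h2 =>
                obtain ⟨ha, hys'⟩ := List.cons_prefix_cons.mp hpre
                by_cases hnil : ys' = []
                · exfalso
                  subst hnil
                  simp only [List.length_cons, List.length_nil] at h1
                  push_cast at h1; omega
                · left
                  refine ⟨ys', hys', hnil, fun y hy => h2 y (List.mem_cons_of_mem _ hy), ?_⟩
                  simp only [List.length_cons] at h1; push_cast at h1 ⊢; omega
            · right; exact ⟨ys, hinf, h1, h2⟩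
    · simp only [if_neg hs]
      rw [ih 0 le_rfl]
      have habs : ∀ p : List Int, p <+: s :: rest → p ≠ [] → (∀ y ∈ p, y ≤ num) → False := by
        intro p hp hne hle
        match p, hp with
        | [], _ => exact hne rfl
        | a :: p', hp =>
          obtain ⟨ha, _⟩ := List.cons_prefix_cons.mp hp
          exact hs (ha ▸ hle a List.mem_cons_self)
      constructor
      · rintro (⟨p, hp, hne, hle, hlen⟩ | hr)
        · -- a prefix of rest of length ≥ k is itself a run
          right
          obtain ⟨ys, hys, h1, h2⟩ : HasRun rest num k := by
            refine ⟨p, hp.isInfix, by omega, hle⟩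
          exact ⟨ys, hys.trans (List.suffix_cons _ _).isInfix, h1, h2⟩
        · obtain ⟨ys, hys, h1, h2⟩ := hr
          right; exact ⟨ys, hys.trans (List.suffix_cons _ _).isInfix, h1, h2⟩
      · rintro (⟨p, hp, hne, hle, _⟩ | hr)
        · exact absurd (habs p hp hne hle) not_false
        · obtain ⟨ys, hys, h1, h2⟩ := hr
          rcases List.infix_cons_iff.mp hys with hpre | hinf
          · exfalso
            exact habs ys hpre (by intro hnil; subst hnil; simp at h1; omega) h2
          · right; exact ⟨ys, hinf, h1, h2⟩

theorem check_false_iff (stones : List Int) (num k : Int) (hk : 1 ≤ k) :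
    check stones num k = false ↔ HasRun stones num k := by
  unfold check
  rw [checkGo_false_iff num k hk stones 0 le_rfl]
  constructor
  · rintro (⟨p, hp, hne, hle, hlen⟩ | hr)
    · exact ⟨p, hp.isInfix, by omega, hle⟩
    · exact hr
  · intro hr; right; exact hr

-- B-side: membership of a window whose maximum is ≤ num is the same spec.
theorem winMax_le_iff (stones : List Int) (k : Int) (hk : 1 ≤ k) (num : Int) :
    (∃ i, i ∈ PySem.List.pyRange 0 ((stones.length : Int) - k + 1) ∧ winMax stones k i ≤ num) ↔
      HasRun stones num k := by
  constructor
  · rintro ⟨i, hi, hle⟩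
    obtain ⟨hi0, hi1⟩ := PySem.List.mem_pyRange_one.mp hi
    set ys := PySem.List.slice stones (some i) (some (i + k)) with hys
    have hysdef : ys = List.take ((i + k).toNat - i.toNat) (List.drop i.toNat stones) :=
      PySem.List.slice_toNat stones hi0 (by omega)
    have hinf : ys <:+: stones := by
      rw [hysdef]
      exact (List.take_prefix _ _).isInfix.trans (List.drop_suffix _ _).isInfix
    have hlen : (k : Int) ≤ ys.length := by
      rw [hysdef]
      simp only [List.length_take, List.length_drop]
      omega
    have hne : ys ≠ [] := by
      intro hnil
      rw [hnil] at hlen; simp at hlen; omega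
    obtain ⟨m, hm⟩ : ∃ m, PySem.List.max? ys (fun y => y) = some m := by
      cases hmm : PySem.List.max? ys (fun y => y) with
      | none => exact absurd ((PySem.List.max?_eq_none_iff _ _).mp hmm) hne
      | some m => exact ⟨m, rfl⟩
    have hw : winMax stones k i = m := by unfold winMax; rw [← hys, hm]; rfl
    refine ⟨ys, hinf, hlen, fun y hy => ?_⟩
    calc y ≤ m := PySem.List.max?_isMax hm y hy
      _ ≤ num := hw ▸ hle
  · rintro ⟨ys, hys, hlen, hle⟩
    obtain ⟨s, t, hst⟩ := hys
    refine ⟨(s.length : Int), ?_, ?_⟩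
    · rw [PySem.List.mem_pyRange_one]
      constructor
      · positivity
      · have : s.length + ys.length + t.length = stones.length := by
          have := congrArg List.length hst
          simp only [List.length_append] at this
          omega
        omega
    · -- the window at s.length is the first k elements of ys, all ≤ num
      set w := PySem.List.slice stones (some (s.length : Int)) (some ((s.length : Int) + k)) with hw
      have hwdef : w = List.take (((s.length : Int) + k).toNat - ((s.length : Int)).toNat)
          (List.drop ((s.length : Int)).toNat stones) :=
        PySem.List.slice_toNat stones (by positivity) (by omega)
      have hdrop : List.drop s.length stones = ys ++ t := by
        rw [← hst, List.append_assoc, List.drop_left]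
      have hsub : ∀ y ∈ w, y ≤ num := by
        intro y hy
        rw [hwdef] at hy
        simp only [Int.toNat_natCast] at hy
        rw [hdrop] at hy
        have hy2 := List.mem_of_mem_take hy
        rcases List.mem_append.mp hy2 with h | h
        · exact hle y h
        · -- cannot be in t: the take length is ≤ ys.length
          have hlen2 : ((s.length : Int) + k).toNat - s.length ≤ ys.length := by omega
          rw [List.take_append] at hy
          rcases List.mem_append.mp hy with h' | h'
          · exact hle y (List.mem_of_mem_take h')
          · have : ((s.length : Int) + k).toNat - s.length - ys.length = 0 := by omega
            rw [this] at h'; simp at h'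
        -- (first rcases branch already covers ys)
      obtain ⟨m, hm⟩ : ∃ m, PySem.List.max? w (fun y => y) = some m := by
        cases hmm : PySem.List.max? w (fun y => y) with
        | none =>
          exfalso
          have hwnil := (PySem.List.max?_eq_none_iff _ _).mp hmm
          rw [hwdef] at hwnil
          simp only [Int.toNat_natCast] at hwnil
          rw [hdrop] at hwnil
          have := congrArg List.length hwnil
          simp only [List.length_take, List.length_append, List.length_nil] at this
          omega
        | some m => exact ⟨m, rfl⟩
      have : winMax stones k (s.length : Int) = m := by unfold winMax; rw [← hw, hm]; rfl
      rw [this]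
      exact hsub m (PySem.List.max?_mem hm)

-- the fold in solution_alt is a fold of min
theorem foldl_win_eq_min (stones : List Int) (k : Int) (idxs : List Int) (a : Int) :
    idxs.foldl (fun best i => if winMax stones k i < best then winMax stones k i else best) a =
      idxs.foldl (fun best i => min best (winMax stones k i)) a := by
  induction idxs generalizing a with
  | nil => rfl
  | cons i rest ih =>
    simp only [List.foldl_cons]
    rw [ih]
    congr 1
    simp only [min_def]
    split_ifs <;> omega

theorem foldl_min_le_init (f : Int → Int) (idxs : List Int) (a : Int) :
    idxs.foldl (fun b i => min b (f i)) a ≤ a := by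
  induction idxs generalizing a with
  | nil => simp
  | cons i rest ih =>
    simp only [List.foldl_cons]
    exact le_trans (ih _) (min_le_left _ _)

theorem lt_foldl_min_iff (f : Int → Int) (idxs : List Int) (a num : Int) :
    num < idxs.foldl (fun b i => min b (f i)) a ↔ num < a ∧ ∀ i ∈ idxs, num < f i := by
  induction idxs generalizing a with
  | nil => simp
  | cons i rest ih =>
    simp only [List.foldl_cons, ih, List.mem_cons]
    constructor
    · rintro ⟨h1, h2⟩
      exact ⟨by omega, fun j hj => by rcases hj with rfl | hj; omega; exact h2 j hj⟩
    · rintro ⟨h1, h2⟩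
      exact ⟨by have := h2 i (Or.inl rfl); omega, fun j hj => h2 j (Or.inr hj)⟩

-- T := the value of B's fold; on the search interval, check tests num < T
theorem check_iff_lt (stones : List Int) (k : Int) (hk : 1 ≤ k) (num : Int)
    (hnum : num ≤ 200000000) :
    check stones num k = true ↔
      num < (PySem.List.pyRange 0 ((stones.length : Int) - k + 1)).foldl
        (fun b i => min b (winMax stones k i)) 200000001 := by
  rw [lt_foldl_min_iff]
  constructor
  · intro hc
    refine ⟨by omega, fun i hi => ?_⟩
    by_contra hle
    have : HasRun stones num k :=
      (winMax_le_iff stones k hk num).mp ⟨i, hi, by omega⟩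
    rw [← check_false_iff stones num k hk] at this
    rw [hc] at this; cases this
  · rintro ⟨_, h⟩
    by_contra hc
    have hc' : check stones num k = false := by
      cases hcc : check stones num k
      · rfl
      · exact absurd hcc hc
    obtain ⟨i, hi, hle⟩ := (winMax_le_iff stones k hk num).mpr
      ((check_false_iff stones num k hk).mp hc')
    have := h i hi
    omega

-- the binary-search loop computes the clamp of the threshold T
theorem solGo_eq_clamp (stones : List Int) (k : Int) (T : Int) :
    ∀ (fuel : ℕ) (l r : Int), (r + 1 - l).toNat ≤ fuel → l ≤ r + 1 →
      (∀ m, l ≤ m → m ≤ r → (check stones m k = true ↔ m < T)) →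
      solGo stones k fuel l r = max l (min T (r + 1)) := by
  intro fuel
  induction fuel with
  | zero =>
    intro l r hf hlr _
    have hl : l = r + 1 := by omega
    rw [solGo]
    omega
  | succ n ih =>
    intro l r hf hlr hiff
    rw [solGo]
    by_cases h : l ≤ r
    · rw [if_pos h]
      have hb := PySem.Int.floordiv_two_mid_bounds h
      set mid := PySem.Int.floordiv (l + r) 2 with hmid
      have hmiff := hiff mid hb.1 hb.2
      by_cases hc : check stones mid k = true
      · rw [if_pos hc]
        have hT : mid < T := hmiff.mp hc
        rw [ih (mid + 1) r (by omega) (by omega)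
          (fun m hm1 hm2 => hiff m (by omega) hm2)]
        omega
      · rw [if_neg hc]
        have hT : T ≤ mid := by
          by_contra hTT
          exact hc (hmiff.mpr (by omega))
        rw [ih l (mid - 1) (by omega) (by omega)
          (fun m hm1 hm2 => hiff m hm1 (by omega))]
        omega
    · rw [if_neg h]
      omega

-- ===== VERDICT (by name: the statement is the Claim_ definition above) =====
theorem solution_spec : Claim_equal_solution := by
  intro stones k _ hk
  unfold Spec_solution solution
  simp only [solution_alt]
  rw [foldl_win_eq_min]
  set T := (PySem.List.pyRange 0 ((stones.length : Int) - k + 1)).foldl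
    (fun b i => min b (winMax stones k i)) 200000001 with hT
  have hTle : T ≤ 200000001 := foldl_min_le_init _ _ _
  rw [solGo_eq_clamp stones k T 200000001 0 200000000 (by omega) (by omega)
    (fun m hm1 hm2 => check_iff_lt stones k hk m hm2)]
  omega
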